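-- pv_equiv track=rewrite | github.com/Pulkit12dhingra/Healthcare-bot | app.py | space_seperated
-- ===== SOURCE A (Python) =====
-- def space_seperated(s1,s2):
--     c=0
--     if (len(s2)<len(s1)):
--         for i in s2:
--             for j in s1:
--                 if i==j:
--                     c+=1
--         if c==len(s2):
--             return 1
--         else:
--             return 0
--     else:
--         for i in s1:
--             for j in s2:
--                 if i==j:
--                     c+=1
--         if c==len(s1):
--             return 1
--         else:
--             return 0
-- ===== SOURCE B (Python) =====
-- def space_seperated(s1, s2):
--     cnt1 = {}
--     for ch in s1:
--         cnt1[ch] = cnt1.get(ch, 0) + 1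
--     cnt2 = {}
--     for ch in s2:
--         cnt2[ch] = cnt2.get(ch, 0) + 1
--     c = sum(cnt1[x] * cnt2[x] for x in cnt1 if x in cnt2)
--     return 1 if c == min(len(s1), len(s2)) else 0
-- ===== Notes on version B (the rewrite author's own statement) =====
-- stated objective: faster
-- what changed: Replaces the two symmetric nested character scans with two frequency tables built in one pass each, a dot product over shared distinct characters, and a comparison against min(len(s1), len(s2)) with no branch selecting the shorter string.
import Mathlib
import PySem

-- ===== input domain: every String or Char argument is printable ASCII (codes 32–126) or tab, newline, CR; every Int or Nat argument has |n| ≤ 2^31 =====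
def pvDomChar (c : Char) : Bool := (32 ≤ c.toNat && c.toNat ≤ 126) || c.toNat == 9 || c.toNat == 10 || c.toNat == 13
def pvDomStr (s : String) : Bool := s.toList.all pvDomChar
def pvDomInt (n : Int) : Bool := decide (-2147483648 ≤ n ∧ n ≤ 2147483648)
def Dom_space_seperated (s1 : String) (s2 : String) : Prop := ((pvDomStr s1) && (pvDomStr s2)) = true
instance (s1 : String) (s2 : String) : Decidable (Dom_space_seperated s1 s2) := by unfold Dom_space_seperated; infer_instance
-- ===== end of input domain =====

-- B replaces A's two symmetric nested character scans by two one-pass frequency tables, a dot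
-- product over shared distinct characters, and a comparison against min of the lengths (objective: faster).

-- ===== PORT A =====
def space_seperated (s1 : String) (s2 : String) : Int :=
  let c : Int := 0
  if PySem.Str.len s2 < PySem.Str.len s1 then
    let c := s2.toList.foldl
      (fun c i => s1.toList.foldl (fun c j => if i == j then c + 1 else c) c) c
    if c = PySem.Str.len s2 then 1 else 0
  else
    let c := s1.toList.foldl
      (fun c i => s2.toList.foldl (fun c j => if i == j then c + 1 else c) c) c
    if c = PySem.Str.len s1 then 1 else 0

-- ===== PORT B =====
def space_seperated_alt (s1 : String) (s2 : String) : Int :=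
  let cnt1 := PySem.Dict.counter s1.toList
  let cnt2 := PySem.Dict.counter s2.toList
  let c : Int :=
    ((cnt1.keys.filter (fun x => cnt2.contains x)).map
      (fun x => cnt1.getD x 0 * cnt2.getD x 0)).sum
  if c = min (PySem.Str.len s1) (PySem.Str.len s2) then 1 else 0

-- ===== PRECONDITION & SPEC =====
def Spec_space_seperated (s1 : String) (s2 : String) (out : Int) : Prop := out = space_seperated_alt s1 s2
instance (s1 : String) (s2 : String) (out : Int) : Decidable (Spec_space_seperated s1 s2 out) := by unfold Spec_space_seperated; infer_instance

-- ===== CLAIM (what is proved, stated in full; the proofs are below) =====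
def Claim_equal_space_seperated : Prop := ∀ (s1 : String) (s2 : String), Dom_space_seperated s1 s2 → Spec_space_seperated s1 s2 (space_seperated s1 s2)

-- ===== LEMMAS AND PROOFS =====

-- the pair count Σ_{i ∈ l1} count(i, l2), as an Int
def pvS (l1 l2 : List Char) : Int := (l1.map (fun i => (l2.count i : Int))).sum

-- A's inner loop adds count(i, l)
lemma pv_inner (i : Char) (l : List Char) (c0 : Int) :
    l.foldl (fun c j => if i == j then c + 1 else c) c0 = c0 + (l.count i : Int) := by
  rw [PySem.List.foldl_count_if (fun j => i == j) l c0]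
  congr 1
  norm_cast
  rw [List.count]
  exact List.countP_congr (fun x _ => by rw [Bool.beq_comm])

-- A's nested loops compute the pair count of (outer, inner)
lemma pv_nested (l1 l2 : List Char) (c0 : Int) :
    l1.foldl (fun c i => l2.foldl (fun c j => if i == j then c + 1 else c) c) c0 = c0 + pvS l1 l2 := by
  have hf : (fun (c : Int) (i : Char) => l2.foldl (fun c j => if i == j then c + 1 else c) c)
      = fun c i => c + (l2.count i : Int) := by
    funext c i; exact pv_inner i l2 c
  rw [hf, PySem.List.foldl_add l1 (fun i => (l2.count i : Int)) c0]
  rfl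

-- symmetry of the pair count
lemma pvS_comm (l1 l2 : List Char) : pvS l1 l2 = pvS l2 l1 := by
  induction l2 with
  | nil => simp [pvS]
  | cons a t ih =>
    simp only [pvS, List.map_cons, List.sum_cons] at *
    have h1 : ∀ i : Char, ((a :: t).count i : Int) = (t.count i : Int) + (if a == i then (1:Int) else 0) := by
      intro i; rw [List.count_cons]; split <;> simp
    calc (l1.map (fun i => ((a :: t).count i : Int))).sum
        = (l1.map (fun i => (t.count i : Int) + (if a == i then (1:Int) else 0))).sum := by
          congr 1; exact List.map_congr_left (fun i _ => h1 i)
      _ = (l1.map (fun i => (t.count i : Int))).sum + (l1.map (fun i => if a == i then (1:Int) else 0)).sum :=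
          PySem.List.sum_map_add_int l1 _ _
      _ = ↑(List.count a l1) + (List.map (fun i => (t.count i : Int)) l1).sum := by
          rw [PySem.List.sum_map_ite_one_zero (fun i => a == i) l1]
          rw [List.count]
          rw [List.countP_congr (fun x _ => by rw [Bool.beq_comm])]
          ring
    rw [ih]

-- the filter may be dropped when the dropped terms are 0
lemma pv_sum_filter (p : Char → Bool) (g : Char → Int) (l : List Char)
    (h : ∀ x ∈ l, p x = false → g x = 0) :
    ((l.filter p).map g).sum = (l.map g).sum := by
  induction l with
  | nil => rfl
  | cons a t ih =>
    have ih' := ih (fun x hx => h x (List.mem_cons_of_mem a hx))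
    by_cases hp : p a
    · simp [hp, ih']
    · simp [hp, ih', h a (List.mem_cons_self) (by simpa using hp)]

-- a nodup list containing a sums the indicator of a to f a
lemma pv_single (f : Char → Int) (a : Char) (d : List Char) (hd : d.Nodup) (ha : a ∈ d) :
    (d.map (fun x => (if x == a then (1:Int) else 0) * f x)).sum = f a := by
  induction d with
  | nil => simp at ha
  | cons b t ih =>
    rcases List.mem_cons.mp ha with h | h
    · subst h
      have hna : a ∉ t := (List.nodup_cons.mp hd).1
      have hz : ∀ x ∈ t, (if x == a then (1:Int) else 0) * f x = 0 := by
        intro x hx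
        have hne : x ≠ a := fun e => hna (e ▸ hx)
        simp [hne]
      rw [List.map_cons, List.sum_cons, List.sum_eq_zero (by simpa using hz), add_zero]
      simp
    · have hba : (b == a) = false := by
        simp only [beq_eq_false_iff_ne, ne_eq]
        exact fun e => (List.nodup_cons.mp hd).1 (e ▸ h)
      rw [List.map_cons, List.sum_cons, hba]
      simp only [Bool.false_eq_true, if_false, zero_mul, zero_add]
      exact ih (List.nodup_cons.mp hd).2 h

-- grouping a sum over l by a nodup list of representatives covering l
lemma pv_sum_count_mul (f : Char → Int) (l d : List Char) (hd : d.Nodup)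
    (hmem : ∀ x ∈ l, x ∈ d) :
    (d.map (fun x => (l.count x : Int) * f x)).sum = (l.map f).sum := by
  induction l with
  | nil => simp
  | cons a t ih =>
    have ih' := ih (fun x hx => hmem x (List.mem_cons_of_mem a hx))
    have h1 : ∀ x : Char, ((a :: t).count x : Int) = (t.count x : Int) + (if x == a then (1:Int) else 0) := by
      intro x; rw [List.count_cons, show (a == x) = (x == a) from Bool.beq_comm]
      split <;> simp
    calc (d.map (fun x => ((a :: t).count x : Int) * f x)).sum
        = (d.map (fun x => (t.count x : Int) * f x + (if x == a then (1:Int) else 0) * f x)).sum := by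
          congr 1; exact List.map_congr_left (fun x _ => by rw [h1 x]; ring)
      _ = (d.map (fun x => (t.count x : Int) * f x)).sum + (d.map (fun x => (if x == a then (1:Int) else 0) * f x)).sum :=
          PySem.List.sum_map_add_int d _ _
      _ = (t.map f).sum + f a := by
          rw [ih', pv_single f a d hd (hmem a (List.mem_cons_self))]
      _ = ((a :: t).map f).sum := by simp; ring

-- B's dot product over shared distinct characters is the pair count
lemma pv_alt_eq (s1 s2 : String) :
    space_seperated_alt s1 s2 =
      if pvS s1.toList s2.toList = min (PySem.Str.len s1) (PySem.Str.len s2) then 1 else 0 := by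
  unfold space_seperated_alt
  have hc : ((((PySem.Dict.counter s1.toList).keys.filter
        (fun x => (PySem.Dict.counter s2.toList).contains x)).map
        (fun x => (PySem.Dict.counter s1.toList).getD x 0 * (PySem.Dict.counter s2.toList).getD x 0)).sum)
      = pvS s1.toList s2.toList := by
    simp only [PySem.Dict.keys_counter, PySem.Dict.contains_counter, PySem.Dict.getD_counter]
    rw [pv_sum_filter _ _ _ (by
      intro x hx hpx
      have : x ∉ s2.toList := by simpa using hpx
      simp [List.count_eq_zero.mpr this])]
    exact pv_sum_count_mul _ s1.toList _ (PySem.Set.nodup_ofList _) (fun x hx => (PySem.Set.mem_ofList _ _).mpr hx)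
  dsimp only
  rw [hc]

-- ===== VERDICT (by name: the statement is the Claim_ definition above) =====
theorem space_seperated_spec : Claim_equal_space_seperated := by
  intro s1 s2 _
  unfold Spec_space_seperated
  rw [pv_alt_eq]
  unfold space_seperated
  simp only [pv_nested, zero_add, PySem.Str.len_eq]
  by_cases h : (s2.toList.length : Int) < (s1.toList.length : Int)
  · have hm : min ((s1.toList.length : Int)) ((s2.toList.length : Int)) = (s2.toList.length : Int) := by omega
    rw [if_pos h, pvS_comm]; simp only [hm]
  · have hm : min ((s1.toList.length : Int)) ((s2.toList.length : Int)) = (s1.toList.length : Int) := by omega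
    rw [if_neg h]; simp only [hm]
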